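-- pv_equiv track=rewrite | github.com/Yohan-nedh/Th-me-de-memoire-elasticsearch | collectors/correlator.py | get_mitre_for_cve
-- ===== SOURCE A (Python) =====
-- CWE_TO_TACTIC = {
--     "CWE-89":  ["Initial Access", "Execution"],
--     "CWE-79":  ["Initial Access", "Execution"],
--     "CWE-78":  ["Execution", "Privilege Escalation"],
--     "CWE-22":  ["Initial Access", "Collection"],
--     "CWE-287": ["Initial Access", "Defense Evasion"],
--     "CWE-416": ["Privilege Escalation", "Execution"],
--     "CWE-125": ["Execution", "Credential Access"],
--     "CWE-190": ["Execution", "Privilege Escalation"],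
--     "CWE-269": ["Privilege Escalation"],
--     "CWE-434": ["Initial Access", "Execution"],
--     "CWE-502": ["Initial Access", "Execution"],
--     "CWE-77":  ["Execution"],
--     "CWE-306": ["Initial Access", "Defense Evasion"],
-- }
--
-- def get_mitre_for_cve(cwe_list, mitre_map):
--     techniques = []
--     tactics    = []
--     names      = []
--
--     for cwe in cwe_list:
--         mapped_tactics = CWE_TO_TACTIC.get(cwe, [])
--         for tactic in mapped_tactics:
--             if tactic in mitre_map and tactic not in tactics:
--                 tactics.append(tactic)
--                 for tech in mitre_map[tactic][:3]:
--                     if tech["technique_id"] not in techniques: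
--                         techniques.append(tech["technique_id"])
--                         names.append(tech["name"])
--
--     return techniques[:5], tactics[:3], names[:5]
-- ===== SOURCE B (Python) =====
-- CWE_TO_TACTIC = {
--     "CWE-89":  ["Initial Access", "Execution"],
--     "CWE-79":  ["Initial Access", "Execution"],
--     "CWE-78":  ["Execution", "Privilege Escalation"],
--     "CWE-22":  ["Initial Access", "Collection"],
--     "CWE-287": ["Initial Access", "Defense Evasion"],
--     "CWE-416": ["Privilege Escalation", "Execution"],
--     "CWE-125": ["Execution", "Credential Access"],
--     "CWE-190": ["Execution", "Privilege Escalation"],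
--     "CWE-269": ["Privilege Escalation"],
--     "CWE-434": ["Initial Access", "Execution"],
--     "CWE-502": ["Initial Access", "Execution"],
--     "CWE-77":  ["Execution"],
--     "CWE-306": ["Initial Access", "Defense Evasion"],
-- }
--
--
-- def _uniq_by(xs, key):
--     """Recursive filter-ahead dedup: keep the head, drop every later
--     element with the same key, recurse on what is left."""
--     if not xs:
--         return []
--     head, rest = xs[0], xs[1:]
--     k = key(head)
--     return [head] + _uniq_by([y for y in rest if key(y) != k], key)
--
--
-- def get_mitre_for_cve(cwe_list, mitre_map):
--     # Flatten the mapped-tactic stream, keep those present in mitre_map,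
--     # then dedup recursively (order of first occurrence).
--     stream = [t for cwe in cwe_list
--               for t in CWE_TO_TACTIC.get(cwe, [])
--               if t in mitre_map]
--     tactics = _uniq_by(stream, lambda t: t)
--     # Flatten the (id, name) pair stream of those tactics and dedup by id.
--     pairs = _uniq_by([(tech["technique_id"], tech["name"])
--                       for t in tactics for tech in mitre_map[t][:3]],
--                      lambda p: p[0])
--     return [p[0] for p in pairs][:5], tactics[:3], [p[1] for p in pairs][:5]
-- ===== Notes on version B (the rewrite author's own statement) =====
-- stated objective: alternative
-- what changed: A's interleaved nested loop with accumulator-membership dedup is replaced by a pipeline: flatten the mapped-tactic stream, deduplicate it with a recursive filter-ahead uniq (keep head, filter equal keys out of the tail, recurse), flatten the (id,name) pair stream of those tactics and dedup it the same way keyed by id, then unzip and slice.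
import Mathlib
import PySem

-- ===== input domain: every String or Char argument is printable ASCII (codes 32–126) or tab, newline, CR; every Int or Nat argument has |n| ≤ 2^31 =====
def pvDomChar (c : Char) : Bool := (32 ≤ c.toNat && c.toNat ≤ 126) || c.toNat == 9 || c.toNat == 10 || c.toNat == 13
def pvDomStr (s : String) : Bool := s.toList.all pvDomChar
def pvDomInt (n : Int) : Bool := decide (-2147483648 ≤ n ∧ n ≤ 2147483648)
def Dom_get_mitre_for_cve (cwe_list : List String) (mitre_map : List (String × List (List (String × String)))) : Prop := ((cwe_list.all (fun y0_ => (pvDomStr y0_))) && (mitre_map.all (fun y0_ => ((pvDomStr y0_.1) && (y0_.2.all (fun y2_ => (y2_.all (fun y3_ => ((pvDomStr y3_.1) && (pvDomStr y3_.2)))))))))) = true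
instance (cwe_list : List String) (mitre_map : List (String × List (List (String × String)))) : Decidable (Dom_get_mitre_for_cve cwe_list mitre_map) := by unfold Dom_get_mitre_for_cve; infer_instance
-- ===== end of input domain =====

-- B replaces A's interleaved seen-list loop by flatten + recursive filter-ahead dedup
-- (uniq-by-key) on the tactic stream and on the (id,name) pair stream; same cost,
-- a genuinely different dedup algorithm.


-- ===== PORT A =====
-- module constant CWE_TO_TACTIC (a dict literal with distinct keys)
def CWE_TO_TACTIC : PySem.Dict String (List String) := PySem.Dict.ofList [
  ("CWE-89",  ["Initial Access", "Execution"]),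
  ("CWE-79",  ["Initial Access", "Execution"]),
  ("CWE-78",  ["Execution", "Privilege Escalation"]),
  ("CWE-22",  ["Initial Access", "Collection"]),
  ("CWE-287", ["Initial Access", "Defense Evasion"]),
  ("CWE-416", ["Privilege Escalation", "Execution"]),
  ("CWE-125", ["Execution", "Credential Access"]),
  ("CWE-190", ["Execution", "Privilege Escalation"]),
  ("CWE-269", ["Privilege Escalation"]),
  ("CWE-434", ["Initial Access", "Execution"]),
  ("CWE-502", ["Initial Access", "Execution"]),
  ("CWE-77",  ["Execution"]),
  ("CWE-306", ["Initial Access", "Defense Evasion"])]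

-- body of A's inner `for tactic in mapped_tactics` loop; state s = (techniques, tactics, names).
-- tech["technique_id"] / tech["name"] raise KeyError when the key is absent; Pre_ excludes
-- that, so getD "" is exact on the admitted inputs.  mitre_map[tactic][:3] = take 3 (exact).
def pvAInner (mm : PySem.Dict String (List (List (String × String))))
    (s : List String × List String × List String) (tactic : String) :
    List String × List String × List String :=
  if mm.contains tactic && !(s.2.1.contains tactic) then
    let tactics := s.2.1 ++ [tactic]
    let tn := ((mm.getD tactic []).take 3).foldl
      (fun (tn : List String × List String) tech =>
        let tid := PySem.Dict.getD (PySem.Dict.mk tech) "technique_id" ""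
        if tn.1.contains tid then tn
        else (tn.1 ++ [tid], tn.2 ++ [PySem.Dict.getD (PySem.Dict.mk tech) "name" ""]))
      (s.1, s.2.2)
    (tn.1, tactics, tn.2)
  else s

def get_mitre_for_cve (cwe_list : List String) (mitre_map : List (String × List (List (String × String)))) : List String × List String × List String :=
  let mm := PySem.Dict.mk mitre_map
  let s := cwe_list.foldl
    (fun s cwe => (CWE_TO_TACTIC.getD cwe []).foldl (pvAInner mm) s) ([], [], [])
  (s.1.take 5, s.2.1.take 3, s.2.2.take 5)

-- ===== PORT B =====
-- _uniq_by: recursive filter-ahead dedup (keep head, drop later elements with equal key)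
def pvUniqBy {α β : Type} [BEq β] (key : α → β) : List α → List α
  | [] => []
  | x :: rest => x :: pvUniqBy key (rest.filter (fun y => key y != key x))
termination_by l => l.length
decreasing_by
  simpa using Nat.lt_succ_of_le (List.length_filter_le _ _)

-- (tech["technique_id"], tech["name"]) for one tech dict
def pvPairFn (tech : List (String × String)) : String × String :=
  (PySem.Dict.getD (PySem.Dict.mk tech) "technique_id" "",
   PySem.Dict.getD (PySem.Dict.mk tech) "name" "")

def get_mitre_for_cve_alt (cwe_list : List String) (mitre_map : List (String × List (List (String × String)))) : List String × List String × List String :=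
  let mm := PySem.Dict.mk mitre_map
  let stream := cwe_list.flatMap
    (fun cwe => (CWE_TO_TACTIC.getD cwe []).filter (fun t => mm.contains t))
  let tactics := pvUniqBy (fun t => t) stream
  let pairs := pvUniqBy Prod.fst
    (tactics.flatMap (fun t => ((mm.getD t []).take 3).map pvPairFn))
  ((pairs.map Prod.fst).take 5, tactics.take 3, (pairs.map Prod.snd).take 5)

-- ===== PRECONDITION & SPEC =====
-- a tactic is relevant iff some cwe of cwe_list maps to it
def pvRelevant (cwe_list : List String) (t : String) : Bool :=
  cwe_list.any (fun cwe => (CWE_TO_TACTIC.getD cwe []).contains t)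

-- Pre_ excludes inputs where a tech dict among the first 3 of a relevant tactic's entry lacks
-- the key "technique_id" or "name": A raises KeyError on "technique_id" there, and on "name"
-- A raises unless the id was already collected (in that accidental duplicate-id case A still
-- returns, while B — which reads both keys of every tech up front — raises; see the cite).
def Pre_get_mitre_for_cve (cwe_list : List String) (mitre_map : List (String × List (List (String × String)))) : Prop :=
  (mitre_map.all (fun p =>
    !(pvRelevant cwe_list p.1) ||
    (p.2.take 3).all (fun tech =>
      (PySem.Dict.mk tech).contains "technique_id" && (PySem.Dict.mk tech).contains "name"))) = true
instance (cwe_list : List String) (mitre_map : List (String × List (List (String × String)))) : Decidable (Pre_get_mitre_for_cve cwe_list mitre_map) := by unfold Pre_get_mitre_for_cve; infer_instance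

def pvWitness_get_mitre_for_cve : List String × (List (String × List (List (String × String)))) :=
  (["CWE-89"], [("Initial Access", [[("technique_id", "T1059"), ("name", "Command and Scripting Interpreter")]])])

def Spec_get_mitre_for_cve (cwe_list : List String) (mitre_map : List (String × List (List (String × String)))) (out : List String × List String × List String) : Prop := out = get_mitre_for_cve_alt cwe_list mitre_map
instance (cwe_list : List String) (mitre_map : List (String × List (List (String × String)))) (out : List String × List String × List String) : Decidable (Spec_get_mitre_for_cve cwe_list mitre_map out) := by unfold Spec_get_mitre_for_cve; infer_instance

-- ===== CLAIM (what is proved, stated in full; the proofs are below) =====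
def Claim_equal_get_mitre_for_cve : Prop := ∀ (cwe_list : List String) (mitre_map : List (String × List (List (String × String)))), Dom_get_mitre_for_cve cwe_list mitre_map → Pre_get_mitre_for_cve cwe_list mitre_map → Spec_get_mitre_for_cve cwe_list mitre_map (get_mitre_for_cve cwe_list mitre_map)

-- ===== LEMMAS AND PROOFS =====
-- the generic seen-list dedup step, keyed
def pvGStep {α β : Type} [BEq β] (key : α → β) (acc : List α) (x : α) : List α :=
  if (acc.map key).contains (key x) then acc else acc ++ [x]

-- A's tactic-collection step, in isolation
def pvTacStep (mm : PySem.Dict String (List (List (String × String))))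
    (acc : List String) (tactic : String) : List String :=
  if mm.contains tactic && !(acc.contains tactic) then acc ++ [tactic] else acc

-- the (id,name) pairs contributed by one tactic
def pvPairsOf (mm : PySem.Dict String (List (List (String × String)))) (t : String) :
    List (String × String) :=
  ((mm.getD t []).take 3).map pvPairFn

-- A's emit (techniques,names) as a function of the tactics list
def pvEmitStep (mm : PySem.Dict String (List (List (String × String))))
    (tn : List String × List String) (tactic : String) : List String × List String :=
  ((mm.getD tactic []).take 3).foldl
    (fun (tn : List String × List String) tech =>
      let tid := PySem.Dict.getD (PySem.Dict.mk tech) "technique_id" ""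
      if tn.1.contains tid then tn
      else (tn.1 ++ [tid], tn.2 ++ [PySem.Dict.getD (PySem.Dict.mk tech) "name" ""]))
    tn

def pvEmit (mm : PySem.Dict String (List (List (String × String)))) (ts : List String) :
    List String × List String :=
  ts.foldl (pvEmitStep mm) ([], [])

-- A's invariant state for a current tactics list ts
def pvPack (mm : PySem.Dict String (List (List (String × String)))) (ts : List String) :
    List String × List String × List String :=
  ((pvEmit mm ts).1, ts, (pvEmit mm ts).2)

theorem pvEmit_append (mm : PySem.Dict String (List (List (String × String))))
    (ts : List String) (t : String) :
    pvEmit mm (ts ++ [t]) = pvEmitStep mm (pvEmit mm ts) t := by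
  simp [pvEmit]

theorem pvAInner_pack (mm : PySem.Dict String (List (List (String × String))))
    (ts : List String) (t : String) :
    pvAInner mm (pvPack mm ts) t = pvPack mm (pvTacStep mm ts t) := by
  unfold pvAInner pvTacStep pvPack
  by_cases h : (mm.contains t && !(ts.contains t)) = true
  · rw [if_pos h, if_pos h, pvEmit_append]; rfl
  · rw [if_neg h, if_neg h]

theorem pvInner_fold (mm : PySem.Dict String (List (List (String × String))))
    (l : List String) (ts : List String) :
    l.foldl (pvAInner mm) (pvPack mm ts) = pvPack mm (l.foldl (pvTacStep mm) ts) := by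
  induction l generalizing ts with
  | nil => rfl
  | cons t l ih => simp only [List.foldl_cons, pvAInner_pack]; exact ih _

theorem pvOuter_fold (mm : PySem.Dict String (List (List (String × String))))
    (cwes : List String) (ts : List String) :
    cwes.foldl (fun s cwe => (CWE_TO_TACTIC.getD cwe []).foldl (pvAInner mm) s) (pvPack mm ts)
      = pvPack mm (cwes.foldl (fun acc cwe => (CWE_TO_TACTIC.getD cwe []).foldl (pvTacStep mm) acc) ts) := by
  induction cwes generalizing ts with
  | nil => rfl
  | cons c cwes ih => simp only [List.foldl_cons, pvInner_fold]; exact ih _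

-- folding over a flattened stream = the nested fold
theorem pvFoldl_flatMap {α β σ : Type} (f : σ → β → σ) (g : α → List β) (l : List α) (s : σ) :
    (l.flatMap g).foldl f s = l.foldl (fun s a => (g a).foldl f s) s := by
  induction l generalizing s with
  | nil => rfl
  | cons a l ih => simp [List.foldl_append, ih]

-- the seen-list fold computes the filter-ahead uniq
theorem pvFoldl_gstep {α β : Type} [BEq β] [LawfulBEq β] (key : α → β) (xs acc : List α) :
    xs.foldl (pvGStep key) acc
      = acc ++ pvUniqBy key (xs.filter (fun y => !(acc.map key).contains (key y))) := by
  induction xs generalizing acc with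
  | nil => simp [pvUniqBy]
  | cons x xs ih =>
    rw [List.foldl_cons]
    by_cases h : ((acc.map key).contains (key x)) = true
    · have hstep : pvGStep key acc x = acc := by unfold pvGStep; rw [if_pos h]
      have hmem : key x ∈ acc.map key := by simpa using h
      rw [hstep, ih]
      simp [hmem]
    · have hstep : pvGStep key acc x = acc ++ [x] := by unfold pvGStep; rw [if_neg h]
      have hb : (!(acc.map key).contains (key x)) = true := by simpa using h
      rw [hstep, ih, List.filter_cons, if_pos hb, pvUniqBy, List.filter_filter]
      have hpred : List.filter (fun a => key a != key x && !(acc.map key).contains (key a)) xs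
          = List.filter (fun y => !((acc ++ [x]).map key).contains (key y)) xs := by
        apply List.filter_congr
        intro y _
        by_cases hxy : key y = key x
        · simp [hxy, List.mem_append]
        · have h1 : (key y == key x) = false := beq_eq_false_iff_ne.mpr hxy
          simp [bne, h1, List.mem_append, hxy]
      rw [hpred]
      simp

-- one tactic's harvest, on a packed (ids, names) state
theorem pvEmitStep_pairs (mm : PySem.Dict String (List (List (String × String))))
    (ps : List (String × String)) (t : String) :
    pvEmitStep mm (ps.map Prod.fst, ps.map Prod.snd) t
      = ((((pvPairsOf mm t).foldl (pvGStep Prod.fst) ps).map Prod.fst),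
         (((pvPairsOf mm t).foldl (pvGStep Prod.fst) ps).map Prod.snd)) := by
  unfold pvEmitStep pvPairsOf
  rw [List.foldl_map]
  induction (mm.getD t []).take 3 generalizing ps with
  | nil => rfl
  | cons tech l ih =>
    simp only [List.foldl_cons]
    by_cases h : ((ps.map Prod.fst).contains (pvPairFn tech).1) = true
    · have hid : (ps.map Prod.fst).contains
          (PySem.Dict.getD (PySem.Dict.mk tech) "technique_id" "") = true := h
      simp only [pvGStep, if_pos h, hid, if_pos]
      exact ih ps
    · have hid : (ps.map Prod.fst).contains
          (PySem.Dict.getD (PySem.Dict.mk tech) "technique_id" "") = false := by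
        simpa using h
      simp only [pvGStep, if_neg h, hid, Bool.false_eq_true, if_neg, not_false_iff]
      have := ih (ps ++ [pvPairFn tech])
      simpa [pvPairFn, List.map_append] using this

theorem pvEmit_pairs (mm : PySem.Dict String (List (List (String × String))))
    (ts : List String) (ps : List (String × String)) :
    ts.foldl (pvEmitStep mm) (ps.map Prod.fst, ps.map Prod.snd)
      = (((ts.flatMap (pvPairsOf mm)).foldl (pvGStep Prod.fst) ps).map Prod.fst,
         ((ts.flatMap (pvPairsOf mm)).foldl (pvGStep Prod.fst) ps).map Prod.snd) := by
  induction ts generalizing ps with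
  | nil => rfl
  | cons t ts ih =>
    simp only [List.foldl_cons, List.flatMap_cons, List.foldl_append, pvEmitStep_pairs]
    exact ih _

-- A's tactic step over a list = gstep over the contains-filtered list
theorem pvTacStep_filter (mm : PySem.Dict String (List (List (String × String))))
    (l acc : List String) :
    l.foldl (pvTacStep mm) acc
      = (l.filter (fun t => mm.contains t)).foldl (pvGStep (fun t => t)) acc := by
  induction l generalizing acc with
  | nil => rfl
  | cons t l ih =>
    by_cases h : (mm.contains t) = true
    · simp only [List.foldl_cons, List.filter_cons, h, if_pos, pvTacStep, pvGStep,
        Bool.true_and, List.map_id_fun', id_eq]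
      by_cases h2 : (acc.contains t) = true
      · simp only [h2, Bool.not_true, Bool.false_eq_true, if_neg, not_false_iff, if_pos]
        simpa [pvGStep, h2] using ih acc
      · simp only [Bool.not_eq_true] at h2
        simp only [h2, Bool.not_false, if_pos, Bool.false_eq_true, if_neg, not_false_iff]
        simpa [pvGStep, h2] using ih (acc ++ [t])
    · simp only [Bool.not_eq_true] at h
      simp [h, pvTacStep, ih]

-- the nested tactic fold = gstep fold over B's flattened filtered stream
theorem pvTactics_eq (mm : PySem.Dict String (List (List (String × String))))
    (cwes : List String) :
    cwes.foldl (fun acc cwe => (CWE_TO_TACTIC.getD cwe []).foldl (pvTacStep mm) acc) []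
      = pvUniqBy (fun t => t)
          (cwes.flatMap (fun cwe => (CWE_TO_TACTIC.getD cwe []).filter (fun t => mm.contains t))) := by
  have hfun : (fun (acc : List String) cwe => (CWE_TO_TACTIC.getD cwe []).foldl (pvTacStep mm) acc)
      = (fun acc cwe => ((CWE_TO_TACTIC.getD cwe []).filter (fun t => mm.contains t)).foldl (pvGStep (fun t => t)) acc) := by
    funext acc cwe; exact pvTacStep_filter mm _ acc
  rw [hfun, ← pvFoldl_flatMap]
  rw [pvFoldl_gstep]
  simp

-- ===== VERDICT (by name: the statement is the Claim_ definition above) =====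
theorem get_mitre_for_cve_spec : Claim_equal_get_mitre_for_cve := by
  intro cwe_list mitre_map _ _
  unfold Spec_get_mitre_for_cve
  simp only [get_mitre_for_cve, get_mitre_for_cve_alt]
  rw [show (([], [], []) : List String × List String × List String)
        = pvPack (PySem.Dict.mk mitre_map) [] from rfl,
     pvOuter_fold, pvTactics_eq]
  set mm := PySem.Dict.mk mitre_map
  set tactics := pvUniqBy (fun t => t)
    (cwe_list.flatMap (fun cwe => (CWE_TO_TACTIC.getD cwe []).filter (fun t => mm.contains t)))
  have hemit : pvEmit mm tactics
      = (((tactics.flatMap (pvPairsOf mm)).foldl (pvGStep Prod.fst) []).map Prod.fst,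
         ((tactics.flatMap (pvPairsOf mm)).foldl (pvGStep Prod.fst) []).map Prod.snd) := by
    have := pvEmit_pairs mm tactics []
    simpa [pvEmit] using this
  rw [pvPack, hemit, pvFoldl_gstep]
  have hpf : pvPairsOf mm = (fun t => List.map pvPairFn (List.take 3 (mm.getD t []))) := rfl
  rw [hpf]
  simp
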